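-- pv_equiv track=rewrite | github.com/kodakirk/CitePulse | CitePulse/backend/services.py | check_author_overlap
-- ===== SOURCE A (Python) =====
-- from typing import List, Dict, Optional
--
-- def normalize_author_name(name: str) -> str:
--     if not name:
--         return ""
--     parts = name.strip().split()
--     if parts:
--         last_name = parts[-1].lower()
--         last_name = last_name.replace("jr.", "").replace("sr.", "").replace("iii", "").replace("ii", "")
--         return ''.join(c for c in last_name if c.isalnum())
--     return ""
--
-- def check_author_overlap(original_authors: List[dict], citing_authors: List[dict]) -> bool:
--     if not original_authors or not citing_authors:
--         return False
--
--     orig_names = set()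
--     for author in original_authors:
--         name = author.get("name", "") if isinstance(author, dict) else str(author)
--         normalized = normalize_author_name(name)
--         if normalized:
--             orig_names.add(normalized)
--
--     citing_names = set()
--     for author in citing_authors:
--         name = author.get("name", "") if isinstance(author, dict) else str(author)
--         normalized = normalize_author_name(name)
--         if normalized:
--             citing_names.add(normalized)
--
--     return bool(orig_names & citing_names)
-- ===== SOURCE B (Python) =====
-- from typing import List, Dict, Optional
--
-- def normalize_author_name(name: str) -> str:
--     if not name:
--         return ""
--     parts = name.strip().split()
--     if parts:
--         last_name = parts[-1].lower()
--         last_name = last_name.replace("jr.", "").replace("sr.", "").replace("iii", "").replace("ii", "")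
--         return ''.join(c for c in last_name if c.isalnum())
--     return ""
--
-- def check_author_overlap(original_authors: List[dict], citing_authors: List[dict]) -> bool:
--     if not original_authors or not citing_authors:
--         return False
--
--     def _name(author):
--         return author.get("name", "") if isinstance(author, dict) else str(author)
--
--     for orig in original_authors:
--         n = normalize_author_name(_name(orig))
--         if not n:
--             continue
--         for citing in citing_authors:
--             if normalize_author_name(_name(citing)) == n:
--                 return True
--     return False
-- ===== Notes on version B (the rewrite author's own statement) =====
-- stated objective: alternative
-- what changed: B builds no sets at all: it is a brute-force nested scan that, for each original author's nonempty normalized name, probes the citing authors directly and returns True on the first normalized-name match.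
import Mathlib
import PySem

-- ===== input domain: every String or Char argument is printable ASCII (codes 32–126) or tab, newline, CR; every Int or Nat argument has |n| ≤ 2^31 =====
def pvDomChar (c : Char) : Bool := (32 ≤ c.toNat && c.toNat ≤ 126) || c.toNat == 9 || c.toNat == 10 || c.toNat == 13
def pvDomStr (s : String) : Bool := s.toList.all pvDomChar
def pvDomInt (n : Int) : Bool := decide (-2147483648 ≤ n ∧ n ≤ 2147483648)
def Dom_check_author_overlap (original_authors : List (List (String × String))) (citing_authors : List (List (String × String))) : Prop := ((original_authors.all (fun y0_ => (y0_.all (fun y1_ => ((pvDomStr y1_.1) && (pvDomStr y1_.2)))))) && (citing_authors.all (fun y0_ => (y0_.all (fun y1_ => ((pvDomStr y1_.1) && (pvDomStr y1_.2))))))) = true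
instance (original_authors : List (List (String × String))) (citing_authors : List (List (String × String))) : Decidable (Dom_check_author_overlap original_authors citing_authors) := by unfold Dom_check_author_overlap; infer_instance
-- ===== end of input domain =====

-- B builds no sets: a brute-force nested scan probing citing authors per original author,
-- with early exit on the first normalized-name match (objective: alternative; O(n*m) vs A's O(n+m)).

-- ===== PORT A =====
-- shared module helper normalize_author_name (used by both Pythons)
def normalize_author_name (name : String) : String :=
  if name == "" then ""              -- `if not name`
  else
    let parts := PySem.Str.split₀ (PySem.Str.strip name)   -- name.strip().split()
    if !parts.isEmpty then
      let last_name := PySem.Str.lower (PySem.List.pyGetD parts (-1) "")   -- parts[-1].lower(); index valid: parts nonempty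
      let last_name := PySem.Str.replace last_name "jr." ""
      let last_name := PySem.Str.replace last_name "sr." ""
      let last_name := PySem.Str.replace last_name "iii" ""
      let last_name := PySem.Str.replace last_name "ii" ""
      String.ofList (last_name.toList.filter PySem.Chars.isalnum)   -- ''.join(c for c in last_name if c.isalnum())
    else ""

-- author.get("name","") ; the isinstance(author, dict) test is always true under the type convention
def pvName (author : List (String × String)) : String :=
  PySem.Dict.getD (PySem.Dict.mk author) "name" ""

def check_author_overlap (original_authors : List (List (String × String))) (citing_authors : List (List (String × String))) : Bool :=
  if original_authors.isEmpty || citing_authors.isEmpty then false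
  else
    let orig_names : PySem.Set String := original_authors.foldl (fun s author =>
      let normalized := normalize_author_name (pvName author)
      if normalized ≠ "" then PySem.Set.add s normalized else s) PySem.Set.empty
    let citing_names : PySem.Set String := citing_authors.foldl (fun s author =>
      let normalized := normalize_author_name (pvName author)
      if normalized ≠ "" then PySem.Set.add s normalized else s) PySem.Set.empty
    !(PySem.Set.inter orig_names citing_names).isEmpty   -- bool(orig_names & citing_names)

-- ===== PORT B =====
def check_author_overlap_alt (original_authors : List (List (String × String))) (citing_authors : List (List (String × String))) : Bool :=
  if original_authors.isEmpty || citing_authors.isEmpty then false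
  else
    -- for orig in original_authors: if n: for citing in citing_authors: if … == n: return True
    original_authors.any (fun orig =>
      let n := normalize_author_name (pvName orig)
      n ≠ "" && citing_authors.any (fun citing => normalize_author_name (pvName citing) == n))

-- ===== PRECONDITION & SPEC =====
def Spec_check_author_overlap (original_authors : List (List (String × String))) (citing_authors : List (List (String × String))) (out : Bool) : Prop := out = check_author_overlap_alt original_authors citing_authors
instance (original_authors : List (List (String × String))) (citing_authors : List (List (String × String))) (out : Bool) : Decidable (Spec_check_author_overlap original_authors citing_authors out) := by unfold Spec_check_author_overlap; infer_instance

-- ===== CLAIM (what is proved, stated in full; the proofs are below) =====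
def Claim_equal_check_author_overlap : Prop := ∀ (original_authors : List (List (String × String))) (citing_authors : List (List (String × String))), Dom_check_author_overlap original_authors citing_authors → Spec_check_author_overlap original_authors citing_authors (check_author_overlap original_authors citing_authors)

-- ===== LEMMAS AND PROOFS =====

-- membership in A's conditionally-built name set (stated in the ite-normal form simp produces)
theorem mem_name_fold (l : List (List (String × String))) (s : PySem.Set String) (y : String) :
    y ∈ l.foldl (fun s author =>
      if normalize_author_name (pvName author) = "" then s
      else PySem.Set.add s (normalize_author_name (pvName author))) s
    ↔ y ∈ s ∨ ∃ a ∈ l, normalize_author_name (pvName a) = y ∧ y ≠ "" := by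
  induction l generalizing s with
  | nil => simp
  | cons a l ih =>
    simp only [List.foldl_cons]
    by_cases h : normalize_author_name (pvName a) = ""
    · simp only [h, if_true, ih, List.mem_cons]
      constructor
      · rintro (hs | ⟨b, hb, h1, h2⟩)
        · exact Or.inl hs
        · exact Or.inr ⟨b, Or.inr hb, h1, h2⟩
      · rintro (hs | ⟨b, hb | hb, h1, h2⟩)
        · exact Or.inl hs
        · subst hb; exact absurd (h1.symm.trans h) h2
        · exact Or.inr ⟨b, hb, h1, h2⟩
    · simp only [h, if_false, ih, PySem.Set.mem_add, List.mem_cons]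
      constructor
      · rintro (⟨hs | he⟩ | ⟨b, hb, h1, h2⟩)
        · exact Or.inl hs
        · exact Or.inr ⟨a, Or.inl rfl, he.symm, he ▸ h⟩
        · exact Or.inr ⟨b, Or.inr hb, h1, h2⟩
      · rintro (hs | ⟨b, rfl | hb, h1, h2⟩)
        · exact Or.inl (Or.inl hs)
        · exact Or.inl (Or.inr h1.symm)
        · exact Or.inr ⟨b, hb, h1, h2⟩

-- ===== VERDICT (by name: the statement is the Claim_ definition above) =====
theorem check_author_overlap_spec : Claim_equal_check_author_overlap := by
  intro O C _
  unfold Spec_check_author_overlap check_author_overlap check_author_overlap_alt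
  cases hg : (O.isEmpty || C.isEmpty) with
  | true => simp
  | false =>
    simp only [Bool.false_eq_true, if_false, ne_eq, ite_not]
    rw [Bool.eq_iff_iff]
    simp only [Bool.not_eq_true', List.isEmpty_eq_false_iff, List.any_eq_true,
      Bool.and_eq_true, decide_eq_true_eq, beq_iff_eq]
    constructor
    · intro hne
      obtain ⟨x, hx⟩ := List.exists_mem_of_ne_nil _ hne
      rw [PySem.Set.mem_inter] at hx
      have hxO := hx.1
      have hxC := hx.2
      rw [mem_name_fold] at hxO hxC
      rcases hxO with hxe | ⟨o, ho, ho1, ho2⟩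
      · simp [PySem.Set.empty] at hxe
      rcases hxC with hxe | ⟨c, hc, hc1, _⟩
      · simp [PySem.Set.empty] at hxe
      exact ⟨o, ho, by simp [ho1, ho2], c, hc, hc1.trans ho1.symm⟩
    · rintro ⟨o, ho, hn, c, hc, hceq⟩
      have hn' : normalize_author_name (pvName o) ≠ "" := by simpa using hn
      have hmem : normalize_author_name (pvName o) ∈ PySem.Set.inter
          (O.foldl (fun s author =>
            if normalize_author_name (pvName author) = "" then s
            else PySem.Set.add s (normalize_author_name (pvName author))) PySem.Set.empty)
          (C.foldl (fun s author =>
            if normalize_author_name (pvName author) = "" then s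
            else PySem.Set.add s (normalize_author_name (pvName author))) PySem.Set.empty) := by
        rw [PySem.Set.mem_inter, mem_name_fold, mem_name_fold]
        exact ⟨Or.inr ⟨o, ho, rfl, hn'⟩, Or.inr ⟨c, hc, hceq, hn'⟩⟩
      exact List.ne_nil_of_mem hmem
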